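-- pv_equiv track=rewrite | github.com/Mvitimin/Python_algorithm | DynamicProgramming/number-of-unique-good-subsequences.py | numberOfUniqueGoodSubsequences
-- ===== SOURCE A (Python) =====
-- def numberOfUniqueGoodSubsequences(binary: str) -> int:
-- 	n = len(binary)
-- 	endZero = endOne = 0
-- 	hasZero = False
--
-- 	for i, c in enumerate(binary):
-- 		if c == '0':
-- 			endZero = endZero + endOne
-- 			hasZero = True
-- 		else:
-- 			endOne = endZero + endOne + 1
-- 	return (endZero + endOne + hasZero) % (10 ** 9 + 7)
-- ===== SOURCE B (Python) =====
-- def numberOfUniqueGoodSubsequences(binary: str) -> int: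
--     # Classic distinct-subsequence DP with last-occurrence subtraction:
--     # dp counts distinct subsequences that are empty or have no leading zero;
--     # last[k] remembers the extension count at the previous step with the same
--     # branch (k = whether the char was '0') so duplicates are removed.
--     dp = 1
--     last = {}
--     for c in binary:
--         z = (c == '0')
--         ext = dp - 1 if z else dp
--         dp += ext - last.get(z, 0)
--         last[z] = ext
--     return (dp - 1 + ('0' in binary)) % (10 ** 9 + 7)
-- ===== Notes on version B (the rewrite author's own statement) =====
-- stated objective: alternative
-- what changed: Replaces A's two end-anchored counters (endZero/endOne) by the classic distinct-subsequence DP: one running count of subsequences with no leading zero plus a last-occurrence dictionary that subtracts duplicates, processed by an explicit recursion in the port.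
import Mathlib
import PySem

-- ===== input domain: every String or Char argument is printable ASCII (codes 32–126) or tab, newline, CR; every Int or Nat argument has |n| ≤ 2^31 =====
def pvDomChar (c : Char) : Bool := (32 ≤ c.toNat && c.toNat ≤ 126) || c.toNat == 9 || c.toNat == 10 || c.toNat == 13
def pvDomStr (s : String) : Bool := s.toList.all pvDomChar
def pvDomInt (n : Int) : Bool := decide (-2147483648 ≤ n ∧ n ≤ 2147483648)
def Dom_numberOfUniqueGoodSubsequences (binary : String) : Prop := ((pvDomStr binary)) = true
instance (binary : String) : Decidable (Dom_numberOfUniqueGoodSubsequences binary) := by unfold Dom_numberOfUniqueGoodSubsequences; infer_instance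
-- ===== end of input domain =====

-- B replaces A's two end-anchored counters by the classic distinct-subsequence DP (one running
-- count with last-occurrence duplicate subtraction); alternative decomposition, same cost.

-- ===== PORT A =====
def numberOfUniqueGoodSubsequences (binary : String) : Int :=
  let st := binary.toList.foldl
    (fun (s : Int × Int × Bool) c =>
      if c = '0' then (s.1 + s.2.1, s.2.1, true)
      else (s.1, s.1 + s.2.1 + 1, s.2.2))
    (0, 0, false)
  PySem.Int.mod (st.1 + st.2.1 + (if st.2.2 then 1 else 0)) (10 ^ 9 + 7)

-- ===== PORT B =====
-- Source B's loop over the characters, transcribed as structural recursion on the list;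
-- the Python dict `last` (keyed by the boolean c == '0') is a PySem.Dict Bool Int.
def pvGoodDP : List Char → Int → PySem.Dict Bool Int → Int
  | [], dp, _ => dp
  | c :: rest, dp, last =>
      let z := c == '0'
      let ext := if z then dp - 1 else dp
      pvGoodDP rest (dp + ext - last.getD z 0) (last.insert z ext)

def numberOfUniqueGoodSubsequences_alt (binary : String) : Int :=
  PySem.Int.mod
    (pvGoodDP binary.toList 1 PySem.Dict.empty - 1
      + (if binary.toList.contains '0' then 1 else 0)) (10 ^ 9 + 7)

-- ===== PRECONDITION & SPEC =====
def Spec_numberOfUniqueGoodSubsequences (binary : String) (out : Int) : Prop := out = numberOfUniqueGoodSubsequences_alt binary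
instance (binary : String) (out : Int) : Decidable (Spec_numberOfUniqueGoodSubsequences binary out) := by unfold Spec_numberOfUniqueGoodSubsequences; infer_instance

-- ===== CLAIM (what is proved, stated in full; the proofs are below) =====
def Claim_equal_numberOfUniqueGoodSubsequences : Prop := ∀ (binary : String), Dom_numberOfUniqueGoodSubsequences binary → Spec_numberOfUniqueGoodSubsequences binary (numberOfUniqueGoodSubsequences binary)

-- ===== LEMMAS AND PROOFS =====

-- A's fold step, named for the proofs.
def pvStepA (s : Int × Int × Bool) (c : Char) : Int × Int × Bool :=
  if c = '0' then (s.1 + s.2.1, s.2.1, true) else (s.1, s.1 + s.2.1 + 1, s.2.2)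

-- Invariant: if dp = endZero + endOne + 1 and the dict remembers endZero at key true
-- and endOne at key false, then B's recursion computes endZero' + endOne' + 1.
theorem pv_inv (l : List Char) : ∀ (z o : Int) (h : Bool) (d : PySem.Dict Bool Int),
    d.getD true 0 = z → d.getD false 0 = o →
    pvGoodDP l (z + o + 1) d
      = (l.foldl pvStepA (z, o, h)).1 + (l.foldl pvStepA (z, o, h)).2.1 + 1 := by
  induction l with
  | nil => intro z o h d _ _; simp [pvGoodDP]
  | cons c rest ih =>
    intro z o h d hz ho
    by_cases hc : c = '0'
    · have hb : (c == '0') = true := by simp [hc]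
      simp only [pvGoodDP, hb, if_true, List.foldl_cons]
      have e1 : z + o + 1 + (z + o + 1 - 1) - d.getD true 0 = (z + o) + o + 1 := by
        rw [hz]; ring
      rw [e1, ih (z + o) o true _ (by simp)
            (by simp [PySem.Dict.getD_insert, ho])]
      simp [pvStepA, hc]
    · have hb : (c == '0') = false := by simp [hc]
      simp only [pvGoodDP, hb, Bool.false_eq_true, if_false, List.foldl_cons]
      have e1 : z + o + 1 + (z + o + 1) - d.getD false 0 = z + (z + o + 1) + 1 := by
        rw [ho]; ring
      rw [e1, ih z (z + o + 1) h _ (by simp [PySem.Dict.getD_insert, hz])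
            (by simp)]
      simp [pvStepA, hc]

-- The Bool component of A's fold records whether a '0' was seen.
theorem pv_hz (l : List Char) : ∀ (z o : Int) (h : Bool),
    (l.foldl pvStepA (z, o, h)).2.2 = (h || l.any (· = '0')) := by
  induction l with
  | nil => intro z o h; simp
  | cons c l ih =>
    intro z o h
    by_cases hc : c = '0' <;> simp [pvStepA, hc, ih]

-- ===== VERDICT (by name: the statement is the Claim_ definition above) =====
theorem numberOfUniqueGoodSubsequences_spec : Claim_equal_numberOfUniqueGoodSubsequences := by
  intro binary _
  unfold Spec_numberOfUniqueGoodSubsequences numberOfUniqueGoodSubsequences numberOfUniqueGoodSubsequences_alt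
  have hinv := pv_inv binary.toList 0 0 false PySem.Dict.empty (by simp) (by simp)
  have hh := pv_hz binary.toList 0 0 false
  simp only [show (0 : Int) + 0 + 1 = 1 from rfl] at hinv
  show PySem.Int.mod ((binary.toList.foldl pvStepA (0,0,false)).1
        + (binary.toList.foldl pvStepA (0,0,false)).2.1
        + (if (binary.toList.foldl pvStepA (0,0,false)).2.2 then (1:Int) else 0)) (10 ^ 9 + 7)
      = PySem.Int.mod (pvGoodDP binary.toList 1 PySem.Dict.empty - 1
        + (if binary.toList.contains '0' then (1:Int) else 0)) (10 ^ 9 + 7)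
  rw [hinv, hh]
  simp
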